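-- pv_equiv track=rewrite | github.com/slayraa/AdventCode | 2024/22/main_p1.py | calculate_new_secret_number
-- ===== SOURCE A (Python) =====
-- def mix_number(secret_number, current_number):
--     return (current_number^int(secret_number))
--
-- def prune_number(current_number, constant=16777216):
--     return (current_number % constant)
--
-- def calculate_new_secret_number(secret_number, iterations):
--
--     for i in range(iterations):
--         # Multiply the secret number by 64, then mix and prune
--         secret_number = mix_number(secret_number=secret_number, current_number=(secret_number*64))
--         secret_number = prune_number(current_number=secret_number)
--
--         # Divide the secret number by 32, round the result down to the nearest integer, then mix and prune
--         secret_number = mix_number(secret_number=secret_number, current_number=(secret_number // 32))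
--         secret_number = prune_number(current_number=secret_number)
--
--         # Multiply the secret number by 2048, then mix and prune
--         secret_number = mix_number(secret_number=secret_number, current_number=(secret_number * 2048))
--         secret_number = prune_number(current_number=secret_number)
--
--     return secret_number
-- ===== SOURCE B (Python) =====
-- def _step(s):
--     s = (s ^ (s * 64)) % 16777216
--     s = (s ^ (s // 32)) % 16777216
--     s = (s ^ (s * 2048)) % 16777216
--     return s
--
-- def _apply(cols, v):
--     r = 0
--     for j in range(24):
--         if (v >> j) & 1:
--             r ^= cols[j]
--     return r
--
-- def _mat_mul(m, b):
--     return [_apply(m, c) for c in b]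
--
-- def calculate_new_secret_number(secret_number, iterations):
--     if iterations <= 0:
--         return secret_number
--     # one plain step (it maps any starting integer into [0, 2**24));
--     # the remaining iterations-1 steps are applied as a GF(2) matrix power
--     s = _step(secret_number)
--     n = iterations - 1
--     base = [_step(1 << j) for j in range(24)]
--     while n > 0:
--         if n & 1:
--             s = _apply(base, s)
--         n >>= 1
--         if n > 0:
--             base = _mat_mul(base, base)
--     return s
-- ===== Notes on version B (the rewrite author's own statement) =====
-- stated objective: faster
-- what changed: A iterates the xorshift-style PRNG step once per iteration; B performs one plain step and then applies the remaining iterations-1 steps at once by exponentiating the step's 24x24 GF(2) bit-matrix by repeated squaring.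
import Mathlib
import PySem

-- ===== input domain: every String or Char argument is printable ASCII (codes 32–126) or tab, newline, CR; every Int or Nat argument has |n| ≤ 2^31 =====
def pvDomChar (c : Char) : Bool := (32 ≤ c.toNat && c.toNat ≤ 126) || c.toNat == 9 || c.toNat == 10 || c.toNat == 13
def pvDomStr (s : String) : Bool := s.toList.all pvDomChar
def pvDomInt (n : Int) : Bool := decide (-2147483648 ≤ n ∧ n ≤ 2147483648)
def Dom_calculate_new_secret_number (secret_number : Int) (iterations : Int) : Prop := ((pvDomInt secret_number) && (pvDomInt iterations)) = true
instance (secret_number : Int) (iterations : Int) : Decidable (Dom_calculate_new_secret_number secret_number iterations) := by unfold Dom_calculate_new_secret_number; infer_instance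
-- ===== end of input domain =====

-- B replaces A's step-by-step loop (O(iterations) PRNG steps) by one plain step followed by
-- GF(2) matrix exponentiation of the 24-bit linear transform (O(log iterations) matrix squarings).

-- ===== PORT A =====
def mix_number (secret_number : Int) (current_number : Int) : Int :=
  PySem.Int.bxor current_number secret_number    -- current_number ^ int(secret_number)

def prune_number (current_number : Int) (constant : Int) : Int :=
  PySem.Int.mod current_number constant

def calculate_new_secret_number (secret_number : Int) (iterations : Int) : Int :=
  (PySem.List.pyRange 0 iterations 1).foldl
    (fun s _ =>
      let s1 := prune_number (mix_number s (s * 64)) 16777216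
      let s2 := prune_number (mix_number s1 (PySem.Int.floordiv s1 32)) 16777216
      prune_number (mix_number s2 (s2 * 2048)) 16777216)
    secret_number

-- ===== PORT B =====
-- Source B _step
def stepAlt (s : Int) : Int :=
  let s1 := PySem.Int.mod (PySem.Int.bxor s (s * 64)) 16777216
  let s2 := PySem.Int.mod (PySem.Int.bxor s1 (PySem.Int.floordiv s1 32)) 16777216
  PySem.Int.mod (PySem.Int.bxor s2 (s2 * 2048)) 16777216

-- Source B _apply; the loop index j ranges over 0..23, so j.toNat is exact and cols[j] is in
-- range whenever cols has 24 entries (pyGetD's default is never consulted by the proofs)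
def applyCols (cols : List Int) (v : Int) : Int :=
  (PySem.List.pyRange 0 24 1).foldl
    (fun r j =>
      if PySem.Int.band (v >>> j.toNat) 1 ≠ 0 then PySem.Int.bxor r (PySem.List.pyGetD cols j 0)
      else r)
    0

-- Source B _mat_mul
def matMul (m : List Int) (b : List Int) : List Int := b.map (applyCols m)

-- Source B while-loop; n starts at iterations-1 ≥ 0 and Python's `n >>= 1` on a nonnegative
-- int is exactly Nat shiftRight, so the loop counter is carried as a Nat
def powLoop (n : Nat) (base : List Int) (s : Int) : Int :=
  if n = 0 then s
  else
    let s' := if n &&& 1 ≠ 0 then applyCols base s else s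
    let n' := n >>> 1
    if n' = 0 then s' else powLoop n' (matMul base base) s'
termination_by n
decreasing_by
  have : n >>> 1 = n / 2 := Nat.shiftRight_one n
  omega

def calculate_new_secret_number_alt (secret_number : Int) (iterations : Int) : Int :=
  if iterations ≤ 0 then secret_number
  else
    let s := stepAlt secret_number
    let base := (PySem.List.pyRange 0 24 1).map (fun j => stepAlt (1 <<< j.toNat))
    powLoop (iterations - 1).toNat base s

-- ===== PRECONDITION & SPEC =====
def Spec_calculate_new_secret_number (secret_number : Int) (iterations : Int) (out : Int) : Prop := out = calculate_new_secret_number_alt secret_number iterations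
instance (secret_number : Int) (iterations : Int) (out : Int) : Decidable (Spec_calculate_new_secret_number secret_number iterations out) := by unfold Spec_calculate_new_secret_number; infer_instance

-- ===== CLAIM (what is proved, stated in full; the proofs are below) =====
def Claim_equal_calculate_new_secret_number : Prop := ∀ (secret_number : Int) (iterations : Int), Dom_calculate_new_secret_number secret_number iterations → Spec_calculate_new_secret_number secret_number iterations (calculate_new_secret_number secret_number iterations)

-- ===== LEMMAS AND PROOFS =====

-- the PRNG step on naturals
def fN (x : Nat) : Nat :=
  let a := (x ^^^ (x * 64)) % 16777216
  let b := (a ^^^ (a / 32)) % 16777216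
  (b ^^^ (b * 2048)) % 16777216

-- Nat-level model of applyCols
def appN (ncols : List Nat) (x : Nat) : Nat :=
  (List.range 24).foldl (fun r j => if x.testBit j then r ^^^ ncols.getD j 0 else r) 0

theorem bne_is_xor (x y : Bool) : (x != y) = (x ^^ y) := rfl

set_option maxHeartbeats 2000000 in
theorem fN_lin (a b : Nat) : fN (a ^^^ b) = fN a ^^^ fN b := by
  apply Nat.eq_of_testBit_eq
  intro i
  simp only [fN]
  simp only [show (64:Nat) = 2^6 by norm_num, show (2048:Nat) = 2^11 by norm_num,
        show (32:Nat) = 2^5 by norm_num,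
        show (16777216:Nat) = 2^24 by norm_num, ← Nat.shiftLeft_eq,
        Nat.testBit_mod_two_pow, Nat.testBit_xor, Nat.testBit_shiftLeft, Nat.testBit_div_two_pow]
  by_cases h : i < 24
  · interval_cases i <;> (norm_num; simp only [bne_is_xor]; simp [Bool.xor_comm, Bool.xor_left_comm])
  · simp [h]

theorem fN_lt (x : Nat) : fN x < 16777216 := by
  simp only [fN]; omega

theorem fN_zero : fN 0 = 0 := by decide

theorem stepAlt_natCast (x : Nat) : stepAlt (x : Int) = ((fN x : Nat) : Int) := by
  simp only [stepAlt, fN,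
    show (16777216:Int) = ((16777216:Nat):Int) from rfl,
    show (32:Int) = ((32:Nat):Int) from rfl,
    show (64:Int) = ((64:Nat):Int) from rfl,
    show (2048:Int) = ((2048:Nat):Int) from rfl,
    ← Nat.cast_mul, PySem.Int.bxor_natCast, PySem.Int.mod_natCast, PySem.Int.floordiv_natCast]

theorem stepAlt_nonneg_lt (v : Int) : 0 ≤ stepAlt v ∧ stepAlt v < 16777216 :=
  ⟨PySem.Int.mod_nonneg _ (by norm_num), PySem.Int.mod_lt _ (by norm_num)⟩

theorem A_eq_iterate (s : Int) (n : Nat) :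
    calculate_new_secret_number s (n : Int) = stepAlt^[n] s := by
  induction n with
  | zero =>
    unfold calculate_new_secret_number
    rw [PySem.List.pyRange_one_eq_nil (by omega)]; rfl
  | succ n ih =>
    unfold calculate_new_secret_number at ih ⊢
    rw [show (((n+1:Nat)):Int) = ((n:Nat):Int) + 1 by push_cast; ring,
        PySem.List.pyRange_one_succ_right (by positivity), List.foldl_append, ih]
    simp [prune_number, mix_number, stepAlt, PySem.Int.bxor_comm, Function.iterate_succ_apply']

-- iterates of stepAlt on casts are iterates of fN
theorem stepAlt_iterate_natCast (x : Nat) (n : Nat) :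
    stepAlt^[n] (x : Int) = ((fN^[n] x : Nat) : Int) := by
  induction n generalizing x with
  | zero => simp
  | succ n ih => rw [Function.iterate_succ_apply, Function.iterate_succ_apply, stepAlt_natCast, ih]

-- bit-decomposition facts
theorem mod_two_pow_succ_true {x j : Nat} (h : x.testBit j = true) :
    x % 2 ^ (j + 1) = (x % 2 ^ j) ^^^ 2 ^ j := by
  apply Nat.eq_of_testBit_eq
  intro i
  simp only [Nat.testBit_mod_two_pow, Nat.testBit_xor, Nat.testBit_two_pow]
  rcases Nat.lt_trichotomy i j with h1 | h1 | h1
  · simp [h1, Nat.lt_succ_of_lt h1, show ¬ j = i by omega]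
  · subst h1; simp [h]
  · simp [show ¬ i < j + 1 by omega, show ¬ i < j by omega, show ¬ j = i by omega]

theorem mod_two_pow_succ_false {x j : Nat} (h : x.testBit j = false) :
    x % 2 ^ (j + 1) = x % 2 ^ j := by
  apply Nat.eq_of_testBit_eq
  intro i
  simp only [Nat.testBit_mod_two_pow]
  rcases Nat.lt_trichotomy i j with h1 | h1 | h1
  · simp [h1, Nat.lt_succ_of_lt h1]
  · subst h1; simp [h]
  · simp [show ¬ i < j + 1 by omega, show ¬ i < j by omega]

theorem getD_map_of_zero {h : Nat → Nat} (h0 : h 0 = 0) (l : List Nat) (j : Nat) :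
    (l.map h).getD j 0 = h (l.getD j 0) := by
  induction l generalizing j with
  | nil => simp [h0]
  | cons c t ih =>
    cases j with
    | zero => simp
    | succ n => simpa using ih n

theorem getD_map_cast (l : List Nat) (j : Nat) :
    (l.map (fun c : Nat => (c : Int))).getD j 0 = ((l.getD j 0 : Nat) : Int) := by
  induction l generalizing j with
  | nil => simp
  | cons c t ih =>
    cases j with
    | zero => simp
    | succ n => simpa using ih n

theorem getD_map_range {α : Type} [Inhabited α] (f : Nat → α) (d : α) {j n : Nat} (h : j < n) :
    ((List.range n).map f).getD j d = f j := by
  rw [List.getD_eq_getElem?_getD, List.getElem?_map, List.getElem?_range h]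
  rfl

-- appN is linear in its vector argument
theorem appN_lin_aux (ncols : List Nat) (x y : Nat) (l : List Nat) (ax ay : Nat) :
    l.foldl (fun r j => if (x ^^^ y).testBit j then r ^^^ ncols.getD j 0 else r) (ax ^^^ ay)
      = (l.foldl (fun r j => if x.testBit j then r ^^^ ncols.getD j 0 else r) ax) ^^^
        (l.foldl (fun r j => if y.testBit j then r ^^^ ncols.getD j 0 else r) ay) := by
  induction l generalizing ax ay with
  | nil => rfl
  | cons j t ih =>
    simp only [List.foldl_cons, Nat.testBit_xor]
    cases hx : x.testBit j <;> cases hy : y.testBit j <;>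
      simp only [Bool.xor_false, Bool.xor_true, Bool.not_true,
        Bool.not_false, if_true, ← ih] <;>
      congr 1 <;>
      simp [Nat.xor_assoc, Nat.xor_comm, Nat.xor_left_comm, Nat.xor_self, Nat.xor_zero]

theorem appN_lin (ncols : List Nat) (x y : Nat) :
    appN ncols (x ^^^ y) = appN ncols x ^^^ appN ncols y := by
  have := appN_lin_aux ncols x y (List.range 24) 0 0
  simpa [appN] using this

theorem appN_zero (ncols : List Nat) : appN ncols 0 = 0 := by
  have : ∀ l : List Nat, l.foldl (fun r j => if (0:Nat).testBit j then r ^^^ ncols.getD j 0 else r) 0 = 0 := by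
    intro l
    induction l with
    | nil => rfl
    | cons j t ih => simpa [Nat.zero_testBit] using ih
  simpa [appN] using this (List.range 24)

theorem appN_lt (ncols : List Nat) (hc : ∀ c ∈ ncols, c < 16777216) (x : Nat) :
    appN ncols x < 16777216 := by
  have hD : ∀ j : Nat, ncols.getD j 0 < 16777216 := by
    intro j
    rcases Nat.lt_or_ge j ncols.length with h | h
    · rw [List.getD_eq_getElem _ _ h]; exact hc _ (List.getElem_mem h)
    · rw [List.getD_eq_default _ _ h]; norm_num
  have : ∀ (l : List Nat) (a : Nat), a < 16777216 →
      l.foldl (fun r j => if x.testBit j then r ^^^ ncols.getD j 0 else r) a < 16777216 := by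
    intro l
    induction l with
    | nil => intro a ha; exact ha
    | cons j t ih =>
      intro a ha
      simp only [List.foldl_cons]
      apply ih
      split
      · exact Nat.xor_lt_two_pow (n := 24) ha (hD j)
      · exact ha
  exact this (List.range 24) 0 (by norm_num)

-- pushing a linear map through appN
theorem appN_map (h : Nat → Nat) (hlin : ∀ x y, h (x ^^^ y) = h x ^^^ h y) (h0 : h 0 = 0)
    (ncols : List Nat) (x : Nat) :
    appN (ncols.map h) x = h (appN ncols x) := by
  have : ∀ (l : List Nat) (a : Nat),
      l.foldl (fun r j => if x.testBit j then r ^^^ (ncols.map h).getD j 0 else r) (h a)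
        = h (l.foldl (fun r j => if x.testBit j then r ^^^ ncols.getD j 0 else r) a) := by
    intro l
    induction l with
    | nil => intro a; rfl
    | cons j t ih =>
      intro a
      simp only [List.foldl_cons]
      cases hx : x.testBit j
      · rw [if_neg (by simp [hx]), if_neg (by simp [hx])]
        exact ih a
      · rw [if_pos (by simp [hx]), if_pos (by simp [hx]), getD_map_of_zero h0, ← hlin]
        exact ih _
  unfold appN
  have h2 := this (List.range 24) 0
  rw [h0] at h2
  exact h2

def colsOf (g : Nat → Nat) : List Nat := (List.range 24).map (fun j => g (2 ^ j))

-- appN on the basis-column matrix of a linear map computes the map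
theorem appN_basis (g : Nat → Nat) (hlin : ∀ x y, g (x ^^^ y) = g x ^^^ g y) (h0 : g 0 = 0)
    (x : Nat) (hx : x < 16777216) :
    appN (colsOf g) x = g x := by
  have aux : ∀ j : Nat, j ≤ 24 →
      (List.range j).foldl (fun r i => if x.testBit i then r ^^^ (colsOf g).getD i 0 else r) 0
        = g (x % 2 ^ j) := by
    intro j
    induction j with
    | zero => intro _; simp [Nat.mod_one, h0]
    | succ j ih =>
      intro hj
      rw [List.range_succ, List.foldl_append, ih (by omega)]
      simp only [List.foldl_cons, List.foldl_nil]
      have hcol : (colsOf g).getD j 0 = g (2 ^ j) := by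
        unfold colsOf; exact getD_map_range _ _ (by omega)
      cases hb : x.testBit j
      · rw [if_neg (by simp [hb]), mod_two_pow_succ_false hb]
      · rw [if_pos (by simp [hb]), hcol, ← hlin, ← mod_two_pow_succ_true hb]
  have h24 := aux 24 (le_refl 24)
  rw [appN, h24, Nat.mod_eq_of_lt (by simpa using hx)]

-- bridge: applyCols over cast columns and a cast vector is appN
theorem applyCols_natCast (ncols : List Nat) (x : Nat) :
    applyCols (ncols.map (fun c : Nat => (c : Int))) (x : Int) = ((appN ncols x : Nat) : Int) := by
  have aux : ∀ (l : List Nat) (a : Nat),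
      l.foldl (fun r k => if (((x >>> k) &&& 1 : Nat) : Int) ≠ 0
          then PySem.Int.bxor r ((ncols.getD k 0 : Nat) : Int) else r) ((a : Nat) : Int)
        = ((l.foldl (fun r j => if x.testBit j then r ^^^ ncols.getD j 0 else r) a : Nat) : Int) := by
    intro l
    induction l with
    | nil => intro a; rfl
    | cons k t ih =>
      intro a
      simp only [List.foldl_cons]
      have hcond : ((((x >>> k) &&& 1 : Nat) : Int) ≠ 0) ↔ x.testBit k = true := by
        rw [Nat.and_one_is_mod, Nat.testBit_eq_decide_div_mod_eq, Nat.shiftRight_eq_div_pow]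
        simp only [ne_eq, Int.natCast_eq_zero, decide_eq_true_eq]
        omega
      by_cases hb : x.testBit k = true
      · rw [if_pos (hcond.mpr hb), PySem.Int.bxor_natCast, if_pos hb]; exact ih _
      · rw [if_neg (fun hc => hb (hcond.mp hc)), if_neg hb]; exact ih _
  unfold applyCols appN
  rw [PySem.List.pyRange_one]
  simp only [show ((24:Int) - 0).toNat = 24 from rfl, zero_add]
  rw [List.foldl_map]
  simp only [Int.toNat_natCast, PySem.List.pyGetD_natCast, getD_map_cast]
  exact aux (List.range 24) 0

theorem base_eq :
    (PySem.List.pyRange 0 24 1).map (fun j => stepAlt (1 <<< j.toNat))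
      = (colsOf fN).map (fun c : Nat => (c : Int)) := by
  rw [PySem.List.pyRange_one]
  unfold colsOf
  simp only [show ((24:Int) - 0).toNat = 24 from rfl, List.map_map]
  congr 1
  funext j
  simp only [Function.comp_apply, zero_add, Int.toNat_natCast]
  rw [stepAlt_natCast, Nat.shiftLeft_eq, one_mul]

theorem powLoop_spec (n : Nat) (g : Nat → Nat) (ncols : List Nat) (x : Nat)
    (hlin : ∀ a b, g (a ^^^ b) = g a ^^^ g b) (h0 : g 0 = 0) (hb : ∀ y, g y < 16777216)
    (hcols : ∀ c ∈ ncols, c < 16777216)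
    (happ : ∀ v, v < 16777216 → appN ncols v = g v) (hx : x < 16777216) :
    powLoop n (ncols.map (fun c : Nat => (c : Int))) (x : Int) = ((g^[n] x : Nat) : Int) := by
  induction n using Nat.strong_induction_on generalizing g ncols x with
  | _ n IH =>
  rw [powLoop]
  by_cases hn : n = 0
  · subst hn; simp
  · rw [if_neg hn]
    have hsr : n >>> 1 = n / 2 := Nat.shiftRight_one n
    have hodd : n &&& 1 = n % 2 := Nat.and_one_is_mod n
    have happx : applyCols (ncols.map (fun c : Nat => (c : Int))) (x : Int) = ((appN ncols x : Nat) : Int) :=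
      applyCols_natCast ncols x
    have hmm : matMul (ncols.map (fun c : Nat => (c : Int))) (ncols.map (fun c : Nat => (c : Int)))
        = (ncols.map (appN ncols)).map (fun c : Nat => (c : Int)) := by
      unfold matMul
      simp only [List.map_map]
      congr 1
      funext c
      exact applyCols_natCast ncols c
    -- the one-or-zero applications of g at this level
    have key : ∀ (r : Nat), r = n % 2 → (if n &&& 1 ≠ 0 then applyCols (ncols.map (fun c : Nat => (c : Int))) (x : Int) else (x : Int)) = ((g^[r] x : Nat) : Int) := by
      intro r hr
      by_cases hodd2 : n % 2 = 1
      · rw [if_pos (by omega), happx, happ x hx, hr, hodd2]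
        simp
      · rw [if_neg (by omega), hr, show n % 2 = 0 by omega]
        simp
    by_cases hz : n >>> 1 = 0
    · rw [if_pos hz]
      have hn1 : n = 1 := by omega
      rw [key 1 (by omega)]
      rw [hn1]
    · rw [if_neg hz]
      rw [key (n % 2) rfl, hmm]
      have hglt : g^[n % 2] x < 16777216 := by
        rcases Nat.lt_or_ge (n % 2) 1 with h | h
        · interval_cases (n % 2) <;> simpa
        · have : n % 2 = 1 := by omega
          rw [this]; simpa using hb x
      rw [IH (n >>> 1) (by omega) (fun y => g (g y)) (ncols.map (appN ncols)) (g^[n % 2] x)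
        (fun a b => by show g (g (a ^^^ b)) = g (g a) ^^^ g (g b); rw [hlin, hlin])
        (by show g (g 0) = 0; rw [h0, h0]) (fun y => hb _)
        (by
          intro c hc
          rcases List.mem_map.mp hc with ⟨c0, _, rfl⟩
          exact appN_lt ncols hcols c0)
        (by
          intro v hv
          rw [appN_map (appN ncols) (appN_lin ncols) (appN_zero ncols), happ v hv,
              happ (g v) (hb v)])
        hglt]
      have hcomp : (fun y => g (g y)) = g^[2] := by
        funext z
        simp [Function.iterate_succ_apply']
      rw [hcomp, ← Function.iterate_mul]
      rw [← Function.iterate_add_apply]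
      congr 2
      omega

-- ===== VERDICT (by name: the statement is the Claim_ definition above) =====
theorem calculate_new_secret_number_spec : Claim_equal_calculate_new_secret_number := by
  intro s it _
  unfold Spec_calculate_new_secret_number
  by_cases hle : it ≤ 0
  · have h0 : it = ((0:Nat) : Int) ∨ it < 0 := by omega
    unfold calculate_new_secret_number_alt
    rw [if_pos hle]
    rcases h0 with h | h
    · rw [h, A_eq_iterate]; simp
    · unfold calculate_new_secret_number
      rw [PySem.List.pyRange_one_eq_nil (by omega)]; rfl
  · have hpos : it = (((it - 1).toNat + 1 : Nat) : Int) := by omega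
    unfold calculate_new_secret_number_alt
    rw [if_neg hle]
    simp only [base_eq]
    have hx0 := stepAlt_nonneg_lt s
    have hs : stepAlt s = (((stepAlt s).toNat : Nat) : Int) := by omega
    rw [hs, powLoop_spec ((it - 1).toNat) fN (colsOf fN) ((stepAlt s).toNat) fN_lin fN_zero fN_lt
        (by intro c hc; rcases List.mem_map.mp hc with ⟨j, _, rfl⟩; exact fN_lt _)
        (appN_basis fN fN_lin fN_zero) (by omega)]
    rw [hpos, A_eq_iterate, Function.iterate_succ_apply, hs, stepAlt_iterate_natCast]
    simp only [Int.toNat_natCast]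
    have harg : ((((it - 1).toNat + 1 : Nat) : Int) - 1).toNat = (it - 1).toNat := by omega
    rw [harg]
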